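-- pv_equiv track=rewrite | github.com/ItzSunBoi/EPaper-Dashboard | calenderRenderer.py | track_widths_int
-- ===== SOURCE A (Python) =====
-- def track_widths_int(W: int, N: int, g: int) -> list[int]:
--     usable = W - (N - 1) * g
--     base = usable // N
--     remainder = usable % N
--     return [
--         base + (1 if i < remainder else 0)
--         for i in range(N)
--     ]
-- ===== SOURCE B (Python) =====
-- def track_widths_int(W: int, N: int, g: int) -> list[int]:
--     remaining = W - (N - 1) * g
--     widths = []
--     for k in range(N, 0, -1):
--         w = -(-remaining // k)  # ceil(remaining / k)
--         widths.append(w)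
--         remaining -= w
--     return widths
-- ===== Notes on version B (the rewrite author's own statement) =====
-- stated objective: alternative
-- what changed: Replaces A's precomputed divmod plus per-index remainder comparison with a greedy single pass that repeatedly allocates ceil(remaining/k) to the next column for k = N..1, updating the remaining width; no base/remainder are ever computed.
import Mathlib
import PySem

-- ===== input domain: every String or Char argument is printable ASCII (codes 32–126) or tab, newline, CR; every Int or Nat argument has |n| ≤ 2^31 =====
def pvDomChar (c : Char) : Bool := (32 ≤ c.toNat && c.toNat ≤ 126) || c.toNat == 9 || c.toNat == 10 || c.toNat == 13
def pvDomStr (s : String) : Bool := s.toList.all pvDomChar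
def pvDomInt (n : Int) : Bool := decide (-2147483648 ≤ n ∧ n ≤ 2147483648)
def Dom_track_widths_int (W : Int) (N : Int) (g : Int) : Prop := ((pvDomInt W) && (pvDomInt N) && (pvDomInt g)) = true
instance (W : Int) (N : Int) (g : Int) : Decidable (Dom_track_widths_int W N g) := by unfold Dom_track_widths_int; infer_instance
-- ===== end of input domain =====

-- B replaces A's precomputed divmod-and-compare comprehension by a greedy single pass that
-- repeatedly allocates ceil(remaining/k) to the next column (objective: alternative).

-- ===== PORT A =====
def track_widths_int (W : Int) (N : Int) (g : Int) : List Int :=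
  let usable := W - (N - 1) * g
  let base := PySem.Int.floordiv usable N
  let remainder := PySem.Int.mod usable N
  (PySem.List.pyRange 0 N 1).map (fun i => base + (if i < remainder then 1 else 0))

-- ===== PORT B =====
def track_widths_int_alt (W : Int) (N : Int) (g : Int) : List Int :=
  let remaining := W - (N - 1) * g
  ((PySem.List.pyRange N 0 (-1)).foldl
    (fun (s : Int × List Int) k =>
      let w := -(PySem.Int.floordiv (-s.1) k)   -- ceil(remaining / k)
      (s.1 - w, s.2 ++ [w]))
    (remaining, [])).2

-- ===== PRECONDITION & SPEC =====
-- Pre_ excludes exactly N = 0, on which Python A raises ZeroDivisionError.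
def Pre_track_widths_int (W : Int) (N : Int) (g : Int) : Prop := N ≠ 0
instance (W : Int) (N : Int) (g : Int) : Decidable (Pre_track_widths_int W N g) := by unfold Pre_track_widths_int; infer_instance
def pvWitness_track_widths_int : Int × Int × Int := (10, 3, 1)

def Spec_track_widths_int (W : Int) (N : Int) (g : Int) (out : List Int) : Prop := out = track_widths_int_alt W N g
instance (W : Int) (N : Int) (g : Int) (out : List Int) : Decidable (Spec_track_widths_int W N g out) := by unfold Spec_track_widths_int; infer_instance

-- ===== CLAIM =====
def Claim_equal_track_widths_int : Prop := ∀ (W : Int) (N : Int) (g : Int), Dom_track_widths_int W N g → Pre_track_widths_int W N g → Spec_track_widths_int W N g (track_widths_int W N g)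

-- ===== LEMMAS AND PROOFS =====
theorem map_const_pyRange (a b c : Int) :
    (PySem.List.pyRange a b 1).map (fun _ => c) = List.replicate (b - a).toNat c := by
  rw [PySem.List.pyRange_one, List.map_map]
  simp [List.eq_replicate_iff]

-- A's comprehension equals the two-block form, for N > 0.
theorem portA_blocks (W N g : Int) (hpos : 0 < N) :
    track_widths_int W N g =
      List.replicate (PySem.Int.mod (W - (N - 1) * g) N).toNat
          (PySem.Int.floordiv (W - (N - 1) * g) N + 1)
        ++ List.replicate (N - PySem.Int.mod (W - (N - 1) * g) N).toNat
          (PySem.Int.floordiv (W - (N - 1) * g) N) := by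
  unfold track_widths_int
  simp only
  set u := W - (N - 1) * g
  set r := PySem.Int.mod u N with hr
  set b := PySem.Int.floordiv u N with hb
  have h0 : 0 ≤ r := PySem.Int.mod_nonneg (a := u) hpos
  have hlt : r < N := PySem.Int.mod_lt (a := u) hpos
  rw [PySem.List.pyRange_one_append 0 r N h0 (le_of_lt hlt), List.map_append]
  have h1 : (PySem.List.pyRange 0 r 1).map (fun i => b + (if i < r then 1 else 0))
      = (PySem.List.pyRange 0 r 1).map (fun _ => b + 1) := by
    apply List.map_congr_left
    intro i hi
    rw [PySem.List.mem_pyRange_one] at hi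
    simp [hi.2]
  have h2 : (PySem.List.pyRange r N 1).map (fun i => b + (if i < r then 1 else 0))
      = (PySem.List.pyRange r N 1).map (fun _ => b) := by
    apply List.map_congr_left
    intro i hi
    rw [PySem.List.mem_pyRange_one] at hi
    simp [not_lt.mpr hi.1]
  rw [h1, h2, map_const_pyRange, map_const_pyRange]
  norm_num

-- B's greedy countdown loop: if remaining = b*n + r with 0 ≤ r ≤ n, it appends
-- r copies of b+1 followed by n - r copies of b.
theorem greedy_loop (n : Nat) : ∀ (b r : Int) (acc : List Int), 0 ≤ r → r ≤ (n : Int) →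
    ((PySem.List.pyRange (n : Int) 0 (-1)).foldl
      (fun (s : Int × List Int) k =>
        let w := -(PySem.Int.floordiv (-s.1) k)
        (s.1 - w, s.2 ++ [w])) (b * n + r, acc)).2
    = acc ++ List.replicate r.toNat (b + 1) ++ List.replicate (n - r.toNat) b := by
  induction n with
  | zero =>
    intro b r acc h0 h1
    have : r = 0 := le_antisymm (by exact_mod_cast h1) h0
    subst this
    rw [PySem.List.pyRange_neg_one_eq_nil (by norm_num)]
    simp
  | succ m ih =>
    intro b r acc h0 h1
    have hcons : PySem.List.pyRange ((m + 1 : Nat) : Int) 0 (-1)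
        = ((m + 1 : Nat) : Int) :: PySem.List.pyRange (((m + 1 : Nat) : Int) - 1) 0 (-1) :=
      PySem.List.pyRange_neg_one_cons (by positivity)
    rw [hcons, List.foldl_cons]
    simp only
    have hm1 : (((m + 1 : Nat) : Int) - 1) = (m : Int) := by push_cast; ring
    by_cases hr : r = 0
    · -- allocate exactly b
      subst hr
      have hw : -(PySem.Int.floordiv (-(b * ((m + 1 : Nat) : Int) + 0)) ((m + 1 : Nat) : Int)) = b := by
        rw [PySem.Int.neg_floordiv_neg_eq_iff_of_pos (by positivity)]
        constructor <;> nlinarith [Int.natCast_nonneg m]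
      rw [hw]
      have hrem : b * ((m + 1 : Nat) : Int) + 0 - b = b * (m : Int) + 0 := by push_cast; ring
      rw [hrem, hm1, ih b 0 (acc ++ [b]) le_rfl (Int.natCast_nonneg m)]
      simp [List.replicate_succ']
      rw [← List.replicate_succ, List.replicate_succ']
    · -- r > 0 : allocate b + 1
      have hrpos : 0 < r := lt_of_le_of_ne h0 (Ne.symm hr)
      have hw : -(PySem.Int.floordiv (-(b * ((m + 1 : Nat) : Int) + r)) ((m + 1 : Nat) : Int)) = b + 1 := by
        rw [PySem.Int.neg_floordiv_neg_eq_iff_of_pos (by positivity)]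
        constructor <;> nlinarith [Int.natCast_nonneg m]
      rw [hw]
      have hrem : b * ((m + 1 : Nat) : Int) + r - (b + 1) = b * (m : Int) + (r - 1) := by
        push_cast; ring
      have h1' : r ≤ (m : Int) + 1 := by exact_mod_cast h1
      have hrle : r - 1 ≤ (m : Int) := by linarith
      rw [hrem, hm1, ih b (r - 1) (acc ++ [b + 1]) (by linarith) hrle]
      have htn : r.toNat = (r - 1).toNat + 1 := by omega
      have hsub : m - (r - 1).toNat = m + 1 - r.toNat := by omega
      rw [htn, hsub, List.replicate_succ]
      simp
      omega

theorem portB_blocks (W N g : Int) (hpos : 0 < N) :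
    track_widths_int_alt W N g =
      List.replicate (PySem.Int.mod (W - (N - 1) * g) N).toNat
          (PySem.Int.floordiv (W - (N - 1) * g) N + 1)
        ++ List.replicate (N - PySem.Int.mod (W - (N - 1) * g) N).toNat
          (PySem.Int.floordiv (W - (N - 1) * g) N) := by
  unfold track_widths_int_alt
  simp only
  set u := W - (N - 1) * g
  set r := PySem.Int.mod u N with hr
  set b := PySem.Int.floordiv u N with hb
  have h0 : 0 ≤ r := PySem.Int.mod_nonneg (a := u) hpos
  have hlt : r < N := PySem.Int.mod_lt (a := u) hpos
  have hNn : ((N.toNat : Nat) : Int) = N := Int.toNat_of_nonneg (le_of_lt hpos)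
  have hu : u = b * ((N.toNat : Nat) : Int) + r := by
    rw [hNn]
    linarith [PySem.Int.floordiv_mul_add_mod u N]
  have := greedy_loop N.toNat b r [] h0 (by rw [hNn]; exact le_of_lt hlt)
  rw [← hu, hNn] at this
  rw [this]
  have : N.toNat - r.toNat = (N - r).toNat := by omega
  simp [this]

-- ===== VERDICT =====
theorem track_widths_int_spec : Claim_equal_track_widths_int := by
  intro W N g _ hN
  replace hN : N ≠ 0 := hN
  unfold Spec_track_widths_int
  rcases lt_or_gt_of_ne hN with hneg | hpos
  · -- N < 0 : both sides are []
    unfold track_widths_int track_widths_int_alt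
    simp only
    rw [PySem.List.pyRange_one_eq_nil (le_of_lt hneg),
        PySem.List.pyRange_neg_one_eq_nil (le_of_lt hneg)]
    simp
  · rw [portA_blocks W N g hpos, portB_blocks W N g hpos]
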